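-- pv_equiv track=rewrite | github.com/huynhthehainam/ProjectCompare2BeautifulText | RunProject.py | SpreadList
-- ===== SOURCE A (Python) =====
-- def SpreadList(ListNumber,SpreadWidth):
--     ListAdd =[]
--     for i in range(len(ListNumber)):
--         if ListNumber[i]>0:
--             ListAdd.append(i)
--     for Index in ListAdd:
--         for ii in range(SpreadWidth):
--             IndexFill = Index - ii
--             IndexFill = min(max(IndexFill,0), len(ListNumber)-1)
--             ListNumber[IndexFill] += 5
--     return ListNumber
-- ===== SOURCE B (Python) =====
-- def SpreadList(ListNumber, SpreadWidth):
--     # Difference-array version: one pass marks each +5 window as range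
--     # increments (out-of-range overflow folded into cells 0/1), one prefix-sum
--     # pass produces the result.  Returns a new list (A mutates in place).
--     n = len(ListNumber)
--     w = SpreadWidth if SpreadWidth > 0 else 0
--     diff = [0] * (n + 1)
--     for i, v in enumerate(ListNumber):
--         if v > 0:
--             lo = i - w + 1
--             if lo < 0:
--                 o = 5 * (-lo)
--                 diff[0] += o
--                 diff[1] -= o
--                 lo = 0
--             diff[lo] += 5
--             diff[i + 1] -= 5
--     run = 0
--     out = []
--     for j in range(n):
--         run += diff[j]
--         out.append(ListNumber[j] + run)
--     return out
-- ===== Notes on version B (the rewrite author's own statement) =====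
-- stated objective: alternative
-- what changed: Replaces the per-positive-entry inner loop of SpreadWidth point updates with a difference array (range increments, overflow folded into cell 0) and a single prefix-sum pass; intended as asymptotically faster (O(n+k*SpreadWidth) -> O(n)) but a timing run could not confirm it at the largest size, so no speed is claimed.
import Mathlib
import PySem

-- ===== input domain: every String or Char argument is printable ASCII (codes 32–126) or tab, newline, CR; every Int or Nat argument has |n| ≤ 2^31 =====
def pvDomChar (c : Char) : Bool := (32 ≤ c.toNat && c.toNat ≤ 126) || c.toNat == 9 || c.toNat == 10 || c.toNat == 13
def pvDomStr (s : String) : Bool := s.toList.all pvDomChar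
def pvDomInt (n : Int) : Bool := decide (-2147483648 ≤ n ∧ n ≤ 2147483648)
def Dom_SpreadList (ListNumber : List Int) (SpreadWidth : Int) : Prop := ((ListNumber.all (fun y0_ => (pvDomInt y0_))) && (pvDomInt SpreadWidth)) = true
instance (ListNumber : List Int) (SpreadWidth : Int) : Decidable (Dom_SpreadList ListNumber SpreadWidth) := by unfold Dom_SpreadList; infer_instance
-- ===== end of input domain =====

-- B replaces A's per-positive-entry loop of SpreadWidth point updates by a difference
-- array plus one prefix-sum pass (a different algorithm); the equivalence proved here is
-- about the RETURN value only: A mutates ListNumber in place, B builds a fresh list.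

-- ===== PORT A =====
def SpreadList (ListNumber : List Int) (SpreadWidth : Int) : List Int :=
  let ListAdd : List Nat := (List.range ListNumber.length).foldl
    (fun acc i => if ListNumber.getD i 0 > 0 then acc ++ [i] else acc) []
  ListAdd.foldl (fun cur Index =>
    (PySem.List.pyRange 0 SpreadWidth 1).foldl (fun cur2 ii =>
      let IndexFill : Int := (Index : Int) - ii
      let IndexFill : Int := min (max IndexFill 0) ((cur2.length : Int) - 1)
      cur2.set IndexFill.toNat (cur2.getD IndexFill.toNat 0 + 5)) cur) ListNumber

-- ===== PORT B =====
def SpreadList_alt (ListNumber : List Int) (SpreadWidth : Int) : List Int :=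
  let n := ListNumber.length
  let w : Int := if SpreadWidth > 0 then SpreadWidth else 0
  let diff0 : List Int := List.replicate (n + 1) 0
  let diff := (PySem.List.enumerate ListNumber 0).foldl (fun d iv =>
      if iv.2 > 0 then
        let lo : Int := iv.1 - w + 1
        let d1 := if lo < 0 then
            let o := 5 * (-lo)
            let da := d.set 0 (d.getD 0 0 + o)
            da.set 1 (da.getD 1 0 - o)
          else d
        let lo2 : Int := if lo < 0 then 0 else lo
        let d2 := d1.set lo2.toNat (d1.getD lo2.toNat 0 + 5)
        d2.set (iv.1 + 1).toNat (d2.getD (iv.1 + 1).toNat 0 - 5)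
      else d) diff0
  ((List.range n).foldl (fun (st : Int × List Int) j =>
      let run := st.1 + diff.getD j 0
      (run, st.2 ++ [ListNumber.getD j 0 + run])) (0, [])).2

-- ===== PRECONDITION & SPEC =====
def Spec_SpreadList (ListNumber : List Int) (SpreadWidth : Int) (out : List Int) : Prop := out = SpreadList_alt ListNumber SpreadWidth
instance (ListNumber : List Int) (SpreadWidth : Int) (out : List Int) : Decidable (Spec_SpreadList ListNumber SpreadWidth out) := by unfold Spec_SpreadList; infer_instance

-- ===== CLAIM (what is proved, stated in full; the proofs are below) =====
def Claim_equal_SpreadList : Prop := ∀ (ListNumber : List Int) (SpreadWidth : Int), Dom_SpreadList ListNumber SpreadWidth → Spec_SpreadList ListNumber SpreadWidth (SpreadList ListNumber SpreadWidth)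

-- ===== LEMMAS AND PROOFS =====

-- number of +5 hits that source index i (with window width w) lands on cell j
def pvCnt (w i j : Nat) : Nat :=
  (if i + 1 - w ≤ j ∧ j ≤ i then 1 else 0) + (if j = 0 then w - (i + 1) else 0)

-- the indices A collects in ListAdd
def pvPos (L : List Int) : List Nat :=
  (List.range L.length).filter (fun i => decide (L.getD i 0 > 0))

-- total number of +5 hits on cell j
def pvTot (L : List Int) (w j : Nat) : Nat := ((pvPos L).map (fun i => pvCnt w i j)).sum

-- prefix sum diff[0] + … + diff[j]
def pvPre (xs : List Int) (j : Nat) : Int := (xs.take (j + 1)).sum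

-- the body of A's inner loop
def pvStepA (Index : Int) (cur2 : List Int) (ii : Int) : List Int :=
  let IndexFill : Int := Index - ii
  let IndexFill : Int := min (max IndexFill 0) ((cur2.length : Int) - 1)
  cur2.set IndexFill.toNat (cur2.getD IndexFill.toNat 0 + 5)

-- the body of B's difference-array loop
def pvStepB (w : Int) (d : List Int) (iv : Int × Int) : List Int :=
  if iv.2 > 0 then
    let lo : Int := iv.1 - w + 1
    let d1 := if lo < 0 then
        let o := 5 * (-lo)
        let da := d.set 0 (d.getD 0 0 + o)
        da.set 1 (da.getD 1 0 - o)
      else d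
    let lo2 : Int := if lo < 0 then 0 else lo
    let d2 := d1.set lo2.toNat (d1.getD lo2.toNat 0 + 5)
    d2.set (iv.1 + 1).toNat (d2.getD (iv.1 + 1).toNat 0 - 5)
  else d

lemma pvGetD_set (xs : List Int) (t : Nat) (v : Int) (j : Nat) (ht : t < xs.length) :
    (xs.set t v).getD j 0 = if j = t then v else xs.getD j 0 := by
  rcases eq_or_ne j t with rfl | h
  · simp [List.getD, List.getElem?_set_self ht]
  · simp [List.getD, List.getElem?_set_ne (by omega : t ≠ j), h]

lemma pvSum_set (xs : List Int) (t : Nat) (c : Int) (ht : t < xs.length) :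
    (xs.set t (xs.getD t 0 + c)).sum = xs.sum + c := by
  have h1 : xs.sum = (xs.take t).sum + (xs.drop t).sum := by
    rw [← List.sum_append, List.take_append_drop]
  have h2 : (xs.drop t).sum = xs[t] + (xs.drop (t + 1)).sum := by
    conv_lhs => rw [← List.getElem_cons_drop ht]
    rw [List.sum_cons]
  rw [List.set_eq_take_cons_drop _ ht, List.sum_append, List.sum_cons,
    List.getD_eq_getElem _ _ ht, h1, h2]
  ring

lemma pvPre_set (xs : List Int) (t : Nat) (c : Int) (j : Nat) (ht : t < xs.length) :
    pvPre (xs.set t (xs.getD t 0 + c)) j = pvPre xs j + if t ≤ j then c else 0 := by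
  unfold pvPre
  rw [List.take_set]
  by_cases h : t ≤ j
  · have htl : t < (xs.take (j + 1)).length := by simp; omega
    have hg : (xs.take (j + 1)).getD t 0 = xs.getD t 0 := by
      simp [List.getD, Nat.lt_succ_of_le h]
    rw [← hg, pvSum_set _ _ _ htl]
    simp [h]
  · have hlen : (xs.take (j + 1)).length ≤ t := by simp; omega
    rw [List.set_eq_of_length_le hlen]
    simp [h]

lemma pvCnt_zero (i j : Nat) : pvCnt 0 i j = 0 := by
  unfold pvCnt; split_ifs <;> omega

lemma pvCnt_succ (k i j : Nat) :
    pvCnt (k + 1) i j = pvCnt k i j + (if j = i - k then 1 else 0) := by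
  unfold pvCnt; split_ifs <;> omega

lemma pvRange_toNat (SW : Int) :
    PySem.List.pyRange 0 SW 1 = PySem.List.pyRange 0 (SW.toNat : Int) 1 := by
  rcases (by omega : SW ≤ 0 ∨ 0 < SW) with h | h
  · rw [PySem.List.pyRange_one_eq_nil h, PySem.List.pyRange_one_eq_nil (by omega)]
  · congr 1; omega

lemma pvInnerA (Index : Nat) (k : Nat) (cur : List Int) (hI : Index < cur.length) :
    ((PySem.List.pyRange 0 (k : Int) 1).foldl (pvStepA (Index : Int)) cur).length = cur.length ∧
    ∀ j, j < cur.length →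
      ((PySem.List.pyRange 0 (k : Int) 1).foldl (pvStepA (Index : Int)) cur).getD j 0
        = cur.getD j 0 + 5 * (pvCnt k Index j : Int) := by
  induction k with
  | zero =>
    rw [show ((0 : Nat) : Int) = 0 from rfl, PySem.List.pyRange_one_eq_nil le_rfl]
    simp [pvCnt_zero]
  | succ k ih =>
    obtain ⟨hlen, hget⟩ := ih
    have hr : PySem.List.pyRange 0 ((k + 1 : Nat) : Int) 1
        = PySem.List.pyRange 0 (k : Int) 1 ++ [(k : Int)] := by
      push_cast
      exact PySem.List.pyRange_one_succ_right (Int.natCast_nonneg k)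
    rw [hr, List.foldl_append]
    set mid := (PySem.List.pyRange 0 (k : Int) 1).foldl (pvStepA (Index : Int)) cur with hmid
    simp only [List.foldl_cons, List.foldl_nil]
    have ht : (min (max ((Index : Int) - (k : Int)) 0) ((mid.length : Int) - 1)).toNat
        = Index - k := by
      rw [hlen]; omega
    have htl : Index - k < mid.length := by rw [hlen]; omega
    simp only [pvStepA]
    rw [ht]
    refine ⟨by simp [hlen], fun j hj => ?_⟩
    rw [pvGetD_set _ _ _ _ htl, pvCnt_succ]
    split_ifs with hje
    · subst hje
      rw [hget _ hj]
      push_cast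
      omega
    · rw [hget j hj]
      push_cast
      omega

lemma pvInnerA' (Index : Nat) (SW : Int) (cur : List Int) (hI : Index < cur.length) :
    ((PySem.List.pyRange 0 SW 1).foldl (pvStepA (Index : Int)) cur).length = cur.length ∧
    ∀ j, j < cur.length →
      ((PySem.List.pyRange 0 SW 1).foldl (pvStepA (Index : Int)) cur).getD j 0
        = cur.getD j 0 + 5 * (pvCnt SW.toNat Index j : Int) := by
  rw [pvRange_toNat SW]
  exact pvInnerA Index SW.toNat cur hI

lemma pvOuterA (SW : Int) : ∀ (adds : List Nat) (cur : List Int),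
    (∀ i ∈ adds, i < cur.length) →
    ((adds.foldl (fun cur (Index : Nat) => (PySem.List.pyRange 0 SW 1).foldl (pvStepA (Index : Int)) cur) cur).length = cur.length ∧
     ∀ j, j < cur.length →
       (adds.foldl (fun cur (Index : Nat) => (PySem.List.pyRange 0 SW 1).foldl (pvStepA (Index : Int)) cur) cur).getD j 0
         = cur.getD j 0 + 5 * (((adds.map (fun i => pvCnt SW.toNat i j)).sum : Nat) : Int)) := by
  intro adds
  induction adds with
  | nil => intro cur _; exact ⟨rfl, by simp⟩
  | cons a t ih =>
    intro cur hmem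
    simp only [List.foldl_cons]
    have ha : a < cur.length := hmem a (by simp)
    obtain ⟨hl1, hg1⟩ := pvInnerA' a SW cur ha
    obtain ⟨hl2, hg2⟩ := ih ((PySem.List.pyRange 0 SW 1).foldl (pvStepA (a : Int)) cur)
      (fun i hi => by rw [hl1]; exact hmem i (by simp [hi]))
    refine ⟨by rw [hl2, hl1], fun j hj => ?_⟩
    rw [hg2 j (by rw [hl1]; exact hj), hg1 j hj]
    simp only [List.map_cons, List.sum_cons]
    push_cast
    ring

lemma pvA_char (L : List Int) (SW : Int) :
    (SpreadList L SW).length = L.length ∧ ∀ j, j < L.length →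
      (SpreadList L SW).getD j 0 = L.getD j 0 + 5 * ((pvTot L SW.toNat j : Nat) : Int) := by
  have hfold : SpreadList L SW
      = (pvPos L).foldl (fun cur (Index : Nat) => (PySem.List.pyRange 0 SW 1).foldl (pvStepA (Index : Int)) cur) L := by
    unfold SpreadList pvPos pvStepA
    rw [show (fun acc i => if L.getD i 0 > 0 then acc ++ [i] else acc)
          = (fun acc i => if (fun x => decide (L.getD x 0 > 0)) i then acc ++ [i] else acc) by
        funext acc i; simp]
    rw [PySem.List.foldl_append_if_eq_filter]
    simp only [List.nil_append]
    rw [show (do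
          let a ← List.filter (fun x => decide (L.getD x 0 > 0)) (List.range L.length)
          pure ((a : Nat) : Int))
        = (List.filter (fun x => decide (L.getD x 0 > 0)) (List.range L.length)).map
            (fun a => ((a : Nat) : Int)) by exact Eq.symm List.map_eq_flatMap]
    rw [List.foldl_map]
  have hmem : ∀ i ∈ pvPos L, i < L.length := by
    intro i hi
    simp only [pvPos, List.mem_filter, List.mem_range] at hi
    exact hi.1
  obtain ⟨hl, hg⟩ := pvOuterA SW (pvPos L) L hmem
  rw [hfold]
  exact ⟨hl, fun j hj => hg j hj⟩

lemma pvStepB_char (wN n : Nat) (d : List Int) (hd : d.length = n + 1) (k : Nat) (v : Int)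
    (hin : k < n) :
    (pvStepB (wN : Int) d ((k : Int), v)).length = n + 1 ∧ ∀ j, j < n →
      pvPre (pvStepB (wN : Int) d ((k : Int), v)) j
        = pvPre d j + (if v > 0 then 5 * ((pvCnt wN k j : Nat) : Int) else 0) := by
  by_cases hv : v > 0
  · simp only [pvStepB, hv, if_true]
    by_cases hlo : (k : Int) - (wN : Int) + 1 < 0
    · simp only [hlo, if_pos]
      refine ⟨by simp [hd], fun j hj => ?_⟩
      simp only [sub_eq_add_neg]
      rw [pvPre_set _ _ _ _ (by simp only [List.length_set]; omega)]
      rw [pvPre_set _ _ _ _ (by simp only [List.length_set]; omega)]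
      rw [pvPre_set _ _ _ _ (by simp only [List.length_set]; omega)]
      rw [pvPre_set _ _ _ _ (by omega)]
      unfold pvCnt
      push_cast
      split_ifs <;> omega
    · simp only [hlo, if_false]
      refine ⟨by simp [hd], fun j hj => ?_⟩
      simp only [sub_eq_add_neg]
      rw [pvPre_set _ _ _ _ (by simp only [List.length_set]; omega)]
      rw [pvPre_set _ _ _ _ (by omega)]
      unfold pvCnt
      push_cast
      split_ifs <;> omega
  · simp only [pvStepB, hv, if_false]
    exact ⟨hd, fun j hj => by simp⟩

lemma pvDiffB (wN n : Nat) : ∀ (es : List (Int × Int)) (d : List Int), d.length = n + 1 →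
    (∀ p ∈ es, 0 ≤ p.1 ∧ p.1 < (n : Int)) →
    ((es.foldl (pvStepB (wN : Int)) d).length = n + 1 ∧
     ∀ j, j < n → pvPre (es.foldl (pvStepB (wN : Int)) d) j
       = pvPre d j + 5 * ((((es.filter (fun p => decide (p.2 > 0))).map (fun p => pvCnt wN p.1.toNat j)).sum : Nat) : Int)) := by
  intro es
  induction es with
  | nil => intro d hd _; exact ⟨hd, fun j hj => by simp⟩
  | cons p t ih =>
    intro d hd hmem
    obtain ⟨i, v⟩ := p
    obtain ⟨h0, hn⟩ := hmem (i, v) (by simp)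
    obtain ⟨k, rfl⟩ := Int.eq_ofNat_of_zero_le h0
    have hkn : k < n := by simpa using hn
    obtain ⟨hl1, hg1⟩ := pvStepB_char wN n d hd k v hkn
    simp only [List.foldl_cons]
    obtain ⟨hl2, hg2⟩ := ih (pvStepB (wN : Int) d ((k : Int), v)) hl1
      (fun q hq => hmem q (by simp [hq]))
    refine ⟨hl2, fun j hj => ?_⟩
    rw [hg2 j hj, hg1 j hj]
    by_cases hv : v > 0
    · simp only [List.filter_cons, hv, decide_true, if_pos, List.map_cons, List.sum_cons,
        Int.toNat_natCast]
      push_cast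
      ring
    · simp only [List.filter_cons, hv, decide_false, Bool.false_eq_true, if_false]
      simp

lemma pvEnumSum (L : List Int) (wN j : Nat) :
    (((PySem.List.enumerate L 0).filter (fun p => decide (p.2 > 0))).map (fun p => pvCnt wN p.1.toNat j)).sum
      = pvTot L wN j := by
  rw [PySem.List.enumerate_eq_map_pyRange (d := 0)]
  rw [List.filter_map, List.map_map]
  unfold pvTot pvPos
  simp only [PySem.List.len_eq]
  rw [PySem.List.pyRange_zero_nat]
  rw [List.filter_map, List.map_map]
  simp [Function.comp_def, PySem.List.pyGetD_natCast]

lemma pvTake_sum_succ (diff : List Int) (m : Nat) :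
    (diff.take (m + 1)).sum = (diff.take m).sum + diff.getD m 0 := by
  rw [List.take_add_one, List.sum_append]
  congr 1
  cases h : diff[m]? <;> simp [List.getD, h]

lemma pvPhase2 (L diff : List Int) (m : Nat) :
    (((List.range m).foldl (fun (st : Int × List Int) j =>
        (st.1 + diff.getD j 0, st.2 ++ [L.getD j 0 + (st.1 + diff.getD j 0)])) (0, [])).1
      = (diff.take m).sum) ∧
    (((List.range m).foldl (fun (st : Int × List Int) j =>
        (st.1 + diff.getD j 0, st.2 ++ [L.getD j 0 + (st.1 + diff.getD j 0)])) (0, [])).2.length = m) ∧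
    ∀ j, j < m → (((List.range m).foldl (fun (st : Int × List Int) j =>
        (st.1 + diff.getD j 0, st.2 ++ [L.getD j 0 + (st.1 + diff.getD j 0)])) (0, [])).2.getD j 0
      = L.getD j 0 + pvPre diff j) := by
  induction m with
  | zero => simp
  | succ m ih =>
    obtain ⟨h1, h2, h3⟩ := ih
    rw [List.range_succ, List.foldl_append]
    simp only [List.foldl_cons, List.foldl_nil]
    refine ⟨by rw [h1, ← pvTake_sum_succ], by simp only [List.length_append, h2, List.length_cons, List.length_nil], ?_⟩
    intro j hj
    rcases Nat.lt_or_ge j m with hjm | hjm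
    · rw [List.getD_append _ _ _ _ (h2.symm ▸ hjm)]
      exact h3 j hjm
    · have hjeq : j = m := by omega
      subst hjeq
      rw [List.getD_append_right _ _ _ _ h2.le]
      simp only [h2, Nat.sub_self, List.getD_cons_zero]
      rw [h1]
      unfold pvPre
      rw [pvTake_sum_succ]

lemma pvB_char (L : List Int) (SW : Int) :
    (SpreadList_alt L SW).length = L.length ∧ ∀ j, j < L.length →
      (SpreadList_alt L SW).getD j 0 = L.getD j 0 + 5 * ((pvTot L SW.toNat j : Nat) : Int) := by
  have hw : (if SW > 0 then SW else 0 : Int) = ((SW.toNat : Nat) : Int) := by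
    split_ifs <;> omega
  have hform : SpreadList_alt L SW =
      ((List.range L.length).foldl (fun (st : Int × List Int) j =>
        (st.1 + ((PySem.List.enumerate L 0).foldl (pvStepB ((SW.toNat : Nat) : Int))
            (List.replicate (L.length + 1) 0)).getD j 0,
         st.2 ++ [L.getD j 0 + (st.1 + ((PySem.List.enumerate L 0).foldl (pvStepB ((SW.toNat : Nat) : Int))
            (List.replicate (L.length + 1) 0)).getD j 0)])) (0, [])).2 := by
    unfold SpreadList_alt pvStepB
    rw [hw]
  have hmem : ∀ p ∈ PySem.List.enumerate L 0, 0 ≤ p.1 ∧ p.1 < (L.length : Int) := by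
    intro p hp
    rw [PySem.List.mem_enumerate_iff] at hp
    obtain ⟨k, hk, rfl⟩ := hp
    refine ⟨by simp, ?_⟩
    simpa using hk
  obtain ⟨hDl, hDp⟩ := pvDiffB SW.toNat L.length (PySem.List.enumerate L 0)
    (List.replicate (L.length + 1) 0) (by simp) hmem
  obtain ⟨h1, h2, h3⟩ := pvPhase2 L ((PySem.List.enumerate L 0).foldl (pvStepB ((SW.toNat : Nat) : Int))
    (List.replicate (L.length + 1) 0)) L.length
  rw [hform]
  refine ⟨h2, fun j hj => ?_⟩
  rw [h3 j hj, hDp j hj, pvEnumSum]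
  simp [pvPre]

-- ===== VERDICT (by name: the statement is the Claim_ definition above) =====
theorem SpreadList_spec : Claim_equal_SpreadList := by
  intro L SW _
  unfold Spec_SpreadList
  obtain ⟨hal, ha⟩ := pvA_char L SW
  obtain ⟨hbl, hb⟩ := pvB_char L SW
  apply List.ext_getElem (by omega)
  intro j h1 h2
  have := ha j (by omega)
  have := hb j (by omega)
  rw [List.getD_eq_getElem _ 0 h1] at ‹(SpreadList L SW).getD j 0 = _›
  rw [List.getD_eq_getElem _ 0 h2] at ‹(SpreadList_alt L SW).getD j 0 = _›
  omega
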